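-- pv_equiv track=rewrite | github.com/dbfarrow/adventofcode-2023 | 11/run.py | calc_pathlen
-- ===== SOURCE A (Python) =====
-- def calc_pathlen(p, empty_rows, empty_cols, expansion):
--
--     (a, b) = p
--
--     ex = sum([ 1 for c in empty_cols if c > min(a[0], b[0]) and c < max(a[0], b[0]) ])
--     ey = sum([ 1 for r in empty_rows if r > min(a[1], b[1]) and r < max(a[1], b[1]) ])
--
--     e = expansion - 1
--     xdiff = abs(p[1][0] - p[0][0])
--     ydiff = abs(p[1][1] - p[0][1])
--     pathlen = xdiff + ydiff + (ex * e) + (ey * e)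
--     return pathlen
-- ===== SOURCE B (Python) =====
-- def _bisect_left(s, x):
--     lo, hi = 0, len(s)
--     while lo < hi:
--         mid = (lo + hi) // 2
--         if s[mid] < x:
--             lo = mid + 1
--         else:
--             hi = mid
--     return lo
--
-- def _bisect_right(s, x):
--     lo, hi = 0, len(s)
--     while lo < hi:
--         mid = (lo + hi) // 2
--         if s[mid] <= x:
--             lo = mid + 1
--         else:
--             hi = mid
--     return lo
--
-- def calc_pathlen(p, empty_rows, empty_cols, expansion):
--     (a, b) = p
--     xlo, xhi = (a[0], b[0]) if a[0] <= b[0] else (b[0], a[0])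
--     ylo, yhi = (a[1], b[1]) if a[1] <= b[1] else (b[1], a[1])
--     cols = sorted(empty_cols)
--     rows = sorted(empty_rows)
--     ex = _bisect_left(cols, xhi) - _bisect_right(cols, xlo) if xlo < xhi else 0
--     ey = _bisect_left(rows, yhi) - _bisect_right(rows, ylo) if ylo < yhi else 0
--     return (xhi - xlo) + (yhi - ylo) + (ex + ey) * (expansion - 1)
-- ===== Notes on version B (the rewrite author's own statement) =====
-- stated objective: alternative
-- what changed: B replaces A's two linear comprehension scans (with min/max recomputed per element) by sorting each list once and counting the strictly-between elements with two hand-written binary searches (bisect_left/bisect_right difference), and folds the common factor (expansion-1) out of the final formula.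
import Mathlib
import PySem

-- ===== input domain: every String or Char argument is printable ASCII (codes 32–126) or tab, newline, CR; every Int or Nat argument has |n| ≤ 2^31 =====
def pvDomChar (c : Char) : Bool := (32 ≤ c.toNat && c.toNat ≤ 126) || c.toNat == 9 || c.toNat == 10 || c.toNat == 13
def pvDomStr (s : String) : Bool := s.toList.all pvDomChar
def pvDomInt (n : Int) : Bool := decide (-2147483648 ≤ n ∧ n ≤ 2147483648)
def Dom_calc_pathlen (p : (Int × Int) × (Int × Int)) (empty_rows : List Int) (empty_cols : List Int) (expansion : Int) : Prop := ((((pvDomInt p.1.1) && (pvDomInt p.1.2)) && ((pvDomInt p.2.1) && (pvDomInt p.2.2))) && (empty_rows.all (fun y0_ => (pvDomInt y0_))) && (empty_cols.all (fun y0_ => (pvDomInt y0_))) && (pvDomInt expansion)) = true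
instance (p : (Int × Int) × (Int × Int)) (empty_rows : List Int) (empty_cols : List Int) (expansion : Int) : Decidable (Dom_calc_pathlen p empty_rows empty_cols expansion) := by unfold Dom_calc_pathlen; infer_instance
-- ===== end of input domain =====

-- B sorts each list once and counts the empty lines strictly between the coordinates with
-- two binary searches instead of A's linear comprehension scans; same results, no speed claim.

-- ===== PORT A =====
def calc_pathlen (p : (Int × Int) × (Int × Int)) (empty_rows : List Int) (empty_cols : List Int) (expansion : Int) : Int :=
  let a := p.1
  let b := p.2
  let ex : Int := ((empty_cols.filter (fun c => decide (min a.1 b.1 < c ∧ c < max a.1 b.1))).map (fun _ => (1 : Int))).sum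
  let ey : Int := ((empty_rows.filter (fun r => decide (min a.2 b.2 < r ∧ r < max a.2 b.2))).map (fun _ => (1 : Int))).sum
  let e := expansion - 1
  let xdiff := |p.2.1 - p.1.1|
  let ydiff := |p.2.2 - p.1.2|
  xdiff + ydiff + ex * e + ey * e

-- ===== PORT B =====
-- the hand-written _bisect_left/_bisect_right in Source B are Python's bisect loops, which is
-- exactly PySem.List.bisectLeft / bisectRight (same lo/hi/mid loop)
def calc_pathlen_alt (p : (Int × Int) × (Int × Int)) (empty_rows : List Int) (empty_cols : List Int) (expansion : Int) : Int :=
  let a := p.1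
  let b := p.2
  let xp := if a.1 ≤ b.1 then (a.1, b.1) else (b.1, a.1)
  let yp := if a.2 ≤ b.2 then (a.2, b.2) else (b.2, a.2)
  let cols := PySem.List.sorted empty_cols (fun x => x) false
  let rows := PySem.List.sorted empty_rows (fun x => x) false
  let ex : Int := if xp.1 < xp.2 then (PySem.List.bisectLeft cols xp.2 : Int) - (PySem.List.bisectRight cols xp.1 : Int) else 0
  let ey : Int := if yp.1 < yp.2 then (PySem.List.bisectLeft rows yp.2 : Int) - (PySem.List.bisectRight rows yp.1 : Int) else 0
  (xp.2 - xp.1) + (yp.2 - yp.1) + (ex + ey) * (expansion - 1)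

-- ===== PRECONDITION & SPEC =====
def Spec_calc_pathlen (p : (Int × Int) × (Int × Int)) (empty_rows : List Int) (empty_cols : List Int) (expansion : Int) (out : Int) : Prop := out = calc_pathlen_alt p empty_rows empty_cols expansion
instance (p : (Int × Int) × (Int × Int)) (empty_rows : List Int) (empty_cols : List Int) (expansion : Int) (out : Int) : Decidable (Spec_calc_pathlen p empty_rows empty_cols expansion out) := by unfold Spec_calc_pathlen; infer_instance

-- ===== CLAIM (what is proved, stated in full; the proofs are below) =====
def Claim_equal_calc_pathlen : Prop := ∀ (p : (Int × Int) × (Int × Int)) (empty_rows : List Int) (empty_cols : List Int) (expansion : Int), Dom_calc_pathlen p empty_rows empty_cols expansion → Spec_calc_pathlen p empty_rows empty_cols expansion (calc_pathlen p empty_rows empty_cols expansion)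

-- ===== LEMMAS AND PROOFS =====

-- sum of the constant-1 image of a filter is a countP
theorem pv_sum_one_filter (l : List Int) (q : Int → Bool) :
    ((l.filter q).map (fun _ => (1 : Int))).sum = (l.countP q : Int) := by
  induction l with
  | nil => simp
  | cons c t ih =>
    simp only [List.filter_cons, List.countP_cons]
    by_cases h : q c
    · simp only [h, if_pos, List.map_cons, List.sum_cons, ih]
      push_cast
      ring
    · simp [h, List.countP_eq_length_filter]

-- a predicate true exactly on the first r positions has countP = r
theorem pv_countP_threshold (P : Int → Bool) (s : List Int) (r : Nat)
    (hr : r ≤ s.length)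
    (h1 : ∀ (j : Nat) (hj : j < s.length), j < r → P s[j])
    (h2 : ∀ (j : Nat) (hj : j < s.length), r ≤ j → ¬ P s[j]) :
    s.countP P = r := by
  induction s generalizing r with
  | nil =>
    simp only [List.length_nil] at hr
    simp only [List.countP_nil]
    omega
  | cons c t ih =>
    cases r with
    | zero =>
      have hc : ¬ P c := h2 0 (by simp) (Nat.le_refl 0)
      have ht : t.countP P = 0 := by
        apply ih 0 (Nat.zero_le _) (by omega)
        intro j hj _
        exact h2 (j+1) (by simpa using Nat.succ_lt_succ hj) (Nat.zero_le _)
      simp [hc, ht]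
    | succ r' =>
      have hc : P c := h1 0 (by simp) (Nat.succ_pos _)
      have ht : t.countP P = r' := by
        apply ih r' (by simpa using hr)
        · intro j hj hjr
          exact h1 (j+1) (by simpa using Nat.succ_lt_succ hj) (by omega)
        · intro j hj hjr
          exact h2 (j+1) (by simpa using Nat.succ_lt_succ hj) (by omega)
      simp [hc, ht]

theorem pv_bisectLeft_countP (s : List Int) (x : Int)
    (hs : List.Pairwise (· ≤ ·) s) :
    PySem.List.bisectLeft s x = s.countP (fun c => decide (c < x)) := by
  obtain ⟨hlen, hlo, hhi⟩ := PySem.List.bisectLeft_spec s x hs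
  exact (pv_countP_threshold _ s _ hlen
    (fun j hj hjr => by simpa using hlo j hj hjr)
    (fun j hj hjr => by simpa using not_lt.mpr (hhi j hj hjr))).symm

theorem pv_bisectRight_countP (s : List Int) (x : Int)
    (hs : List.Pairwise (· ≤ ·) s) :
    PySem.List.bisectRight s x = s.countP (fun c => decide (c ≤ x)) := by
  obtain ⟨hlen, hlo, hhi⟩ := PySem.List.bisectRight_spec s x hs
  exact (pv_countP_threshold _ s _ hlen
    (fun j hj hjr => by simpa using hlo j hj hjr)
    (fun j hj hjr => by simpa using not_le.mpr (hhi j hj hjr))).symm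

-- splitting an open-interval count into a difference of two one-sided counts
theorem pv_countP_between (l : List Int) (lo hi : Int) (h : lo < hi) :
    (l.countP (fun c => decide (lo < c) && decide (c < hi)) : Int)
      = (l.countP (fun c => decide (c < hi)) : Int) - (l.countP (fun c => decide (c ≤ lo)) : Int) := by
  induction l with
  | nil => simp
  | cons c t ih =>
    simp only [List.countP_cons]
    by_cases h1 : lo < c <;> by_cases h2 : c < hi <;>
      have h3 : (c ≤ lo) = ¬ (lo < c) := by simp [not_lt]
    all_goals simp only [h1, h2, h3, decide_true, decide_false, Bool.and_true, Bool.and_false,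
      decide_not, Bool.not_true, Bool.not_false, if_true]
    all_goals (push_cast; omega)

-- the whole count on one axis
theorem pv_axis (l : List Int) (u v : Int) :
    ((l.filter (fun c => decide (min u v < c ∧ c < max u v))).map (fun _ => (1 : Int))).sum
      = (if (if u ≤ v then (u, v) else (v, u)).1 < (if u ≤ v then (u, v) else (v, u)).2
         then (PySem.List.bisectLeft (PySem.List.sorted l (fun x => x) false) (if u ≤ v then (u, v) else (v, u)).2 : Int)
              - (PySem.List.bisectRight (PySem.List.sorted l (fun x => x) false) (if u ≤ v then (u, v) else (v, u)).1 : Int)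
         else 0) := by
  have hpair : (if u ≤ v then (u, v) else (v, u)) = (min u v, max u v) := by
    by_cases h : u ≤ v <;> simp [h, min_def, max_def]
  rw [hpair, pv_sum_one_filter]
  set s := PySem.List.sorted l (fun x => x) false with hs
  have hperm : s.Perm l := PySem.List.sorted_perm l (fun x => x) false
  have hpw : List.Pairwise (· ≤ ·) s := by
    simpa using PySem.List.sorted_pairwise l (fun x => x)
  have hconv : l.countP (fun c => decide (min u v < c ∧ c < max u v))
      = l.countP (fun c => decide (min u v < c) && decide (c < max u v)) :=
    List.countP_congr (by intro c _; simp)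
  by_cases h : min u v < max u v
  · rw [if_pos h, hconv, ← hperm.countP_eq, pv_countP_between s (min u v) (max u v) h,
        pv_bisectLeft_countP s (max u v) hpw, pv_bisectRight_countP s (min u v) hpw]
  · rw [if_neg h]
    have h0 : l.countP (fun c => decide (min u v < c ∧ c < max u v)) = 0 := by
      rw [List.countP_eq_zero]
      intro c _
      simp only [decide_eq_true_eq, not_and]
      omega
    rw [h0]
    simp

-- |v - u| = max - min
theorem pv_abs_diff (u v : Int) :
    |v - u| = (if u ≤ v then (u, v) else (v, u)).2 - (if u ≤ v then (u, v) else (v, u)).1 := by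
  by_cases h : u ≤ v
  · rw [if_pos h]
    simp only []
    rw [abs_of_nonneg (by omega)]
  · rw [if_neg h]
    simp only []
    rw [abs_of_neg (by omega)]
    ring

-- ===== VERDICT (by name: the statement is the Claim_ definition above) =====
theorem calc_pathlen_spec : Claim_equal_calc_pathlen := by
  intro p er ec exp _
  unfold Spec_calc_pathlen calc_pathlen calc_pathlen_alt
  simp only []
  rw [pv_axis ec p.1.1 p.2.1, pv_axis er p.1.2 p.2.2, pv_abs_diff p.1.1 p.2.1, pv_abs_diff p.1.2 p.2.2]
  ring
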